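-- pv_equiv track=rewrite | github.com/Michaelkomolafe1/All_in_one_optimizer | main_optimizer/correlation_gpp_strategy.py | count_consecutive_spots
-- ===== SOURCE A (Python) =====
-- def count_consecutive_spots(orders):
--     """Count maximum consecutive batting spots"""
--
--     if not orders:
--         return 0
--
--     orders_set = set(orders)
--     max_consecutive = 1
--     current_consecutive = 1
--
--     for i in range(1, 10):
--         if i in orders_set and (i - 1) in orders_set:
--             current_consecutive += 1
--             max_consecutive = max(max_consecutive, current_consecutive)
--         else:
--             current_consecutive = 1 if i in orders_set else 0
--
--     # Check 9-1 wraparound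
--     if 9 in orders_set and 1 in orders_set:
--         max_consecutive = max(max_consecutive, 2)
--
--     return max_consecutive
-- ===== SOURCE B (Python) =====
-- def count_consecutive_spots(orders):
--     """Count maximum consecutive batting spots (start-of-run scan)"""
--     if not orders:
--         return 0
--     s = {x for x in orders if 0 <= x <= 9}
--     best = 1
--     for i in range(10):
--         if i in s and (i - 1) not in s:
--             j = i
--             while j <= 9 and j in s:
--                 j += 1
--             best = max(best, j - i)
--     if 9 in s and 1 in s:
--         best = max(best, 2)
--     return best
-- ===== Notes on version B (the rewrite author's own statement) =====
-- stated objective: alternative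
-- what changed: Replaces A's single incremental run counter carried across spots 1..9 by a start-of-run scan: for each spot that begins a run (present with absent predecessor) walk forward to measure the run length directly, over the set restricted to spots 0-9 built by a filtering set comprehension.
import Mathlib
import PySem

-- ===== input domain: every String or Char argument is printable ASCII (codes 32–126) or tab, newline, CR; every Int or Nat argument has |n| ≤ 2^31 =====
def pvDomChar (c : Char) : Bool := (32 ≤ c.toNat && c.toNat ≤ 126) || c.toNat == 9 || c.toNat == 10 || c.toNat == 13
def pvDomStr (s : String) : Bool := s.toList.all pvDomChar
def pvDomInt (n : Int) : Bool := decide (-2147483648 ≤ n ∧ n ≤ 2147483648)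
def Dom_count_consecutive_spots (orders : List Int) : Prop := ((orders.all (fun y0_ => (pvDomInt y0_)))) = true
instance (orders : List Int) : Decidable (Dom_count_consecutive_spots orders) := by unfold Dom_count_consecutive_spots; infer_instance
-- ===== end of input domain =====

-- B replaces A's incremental run counter by a start-of-run scan (walk forward from each run start
-- over the set restricted to spots 0-9); same cost, different decomposition (objective: alternative).

-- ===== PORT A =====
def count_consecutive_spots (orders : List Int) : Int :=
  if orders = [] then 0
  else
    let s := PySem.Set.ofList orders
    let p := (PySem.List.pyRange 1 10 1).foldl
      (fun (st : Int × Int) i =>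
        if s.contains i && s.contains (i - 1) then
          (max st.1 (st.2 + 1), st.2 + 1)
        else
          (st.1, if s.contains i then 1 else 0)) (1, 1)
    if s.contains 9 && s.contains 1 then max p.1 2 else p.1

-- ===== PORT B =====
-- the inner 'while j <= 9 and j in s: j += 1' of Source B; fuel 10 bounds its (at most 10) iterations
def csWalk (s : PySem.Set Int) (j : Int) (fuel : Nat) : Int :=
  match fuel with
  | 0 => j
  | fuel + 1 => if j ≤ 9 && s.contains j then csWalk s (j + 1) fuel else j

def count_consecutive_spots_alt (orders : List Int) : Int :=
  if orders = [] then 0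
  else
    let s := PySem.Set.ofList (orders.filter (fun x => decide (0 ≤ x ∧ x ≤ 9)))
    let best := (PySem.List.pyRange 0 10 1).foldl
      (fun best i =>
        if s.contains i && !s.contains (i - 1) then
          max best (csWalk s i 10 - i)
        else best) 1
    if s.contains 9 && s.contains 1 then max best 2 else best

-- ===== PRECONDITION & SPEC =====
def Spec_count_consecutive_spots (orders : List Int) (out : Int) : Prop := out = count_consecutive_spots_alt orders
instance (orders : List Int) (out : Int) : Decidable (Spec_count_consecutive_spots orders out) := by unfold Spec_count_consecutive_spots; infer_instance

-- ===== CLAIM (what is proved, stated in full; the proofs are below) =====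
def Claim_equal_count_consecutive_spots : Prop := ∀ (orders : List Int), Dom_count_consecutive_spots orders → Spec_count_consecutive_spots orders (count_consecutive_spots orders)

-- ===== LEMMAS AND PROOFS =====

-- canonical list of the spots 0..9 present according to a membership vector b
def canonSpots (b : Fin 10 → Bool) : List Int :=
  ((List.finRange 10).filter b).map (fun j => (j.val : Int))

lemma contains_ofList_int (xs : List Int) (i : Int) :
    (PySem.Set.ofList xs).contains i = xs.contains i := by
  simp [pysem, List.contains_eq_mem]

lemma contains_canon_of (orders : List Int) (k : Int) (h0 : 0 ≤ k) (h1 : k < 10) :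
    (canonSpots (fun j => orders.contains ((j : Nat) : Int))).contains k = orders.contains k := by
  rcases Int.eq_ofNat_of_zero_le h0 with ⟨n, rfl⟩
  have hn : n < 10 := by exact_mod_cast h1
  simp only [canonSpots, List.contains_eq_mem]
  simp only [List.mem_map, List.mem_filter, List.mem_finRange, true_and, decide_eq_decide,
    decide_eq_true_eq]
  constructor
  · rintro ⟨j, hj, hjk⟩
    have : (j : Nat) = n := by exact_mod_cast hjk
    subst this; exact hj
  · intro h
    exact ⟨⟨n, hn⟩, h, rfl⟩

lemma contains_canon_out (b : Fin 10 → Bool) (k : Int) (h : ¬ (0 ≤ k ∧ k < 10)) :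
    (canonSpots b).contains k = false := by
  simp only [canonSpots, List.contains_eq_mem]
  simp only [List.mem_map, List.mem_filter, List.mem_finRange, true_and, decide_eq_false_iff_not]
  rintro ⟨j, hj, rfl⟩
  exact h ⟨by positivity, by exact_mod_cast j.isLt⟩

lemma contains_filter_eq_canon (orders : List Int) (k : Int) :
    ((PySem.Set.ofList (orders.filter (fun x => decide (0 ≤ x ∧ x ≤ 9)))).contains k)
      = (canonSpots (fun j => orders.contains ((j : Nat) : Int))).contains k := by
  rw [contains_ofList_int]
  by_cases h : 0 ≤ k ∧ k < 10
  · rw [contains_canon_of orders k h.1 h.2]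
    simp [List.contains_eq_mem, List.mem_filter]
    intro _; omega
  · rw [contains_canon_out _ _ h]
    simp [List.contains_eq_mem, List.mem_filter]
    omega

lemma csWalk_congr (s t : PySem.Set Int) (h : ∀ k, s.contains k = t.contains k)
    (j : Int) (fuel : Nat) : csWalk s j fuel = csWalk t j fuel := by
  induction fuel generalizing j with
  | zero => rfl
  | succ n ih => simp only [csWalk, h, ih]

set_option maxRecDepth 16384 in
set_option maxHeartbeats 2000000 in
lemma ports_agree (orders : List Int) :
    count_consecutive_spots orders = count_consecutive_spots_alt orders := by
  by_cases h : orders = []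
  · simp [count_consecutive_spots, count_consecutive_spots_alt, h]
  · unfold count_consecutive_spots count_consecutive_spots_alt
    simp only [h, if_false]
    have hfil := contains_filter_eq_canon orders
    have hwalk := csWalk_congr _ _ hfil
    have hofl : ∀ k : Int, 0 ≤ k → k < 10 →
        (PySem.Set.ofList orders).contains k
          = (canonSpots (fun j => orders.contains ((j : Nat) : Int))).contains k := by
      intro k h0 h1
      rw [contains_ofList_int, contains_canon_of orders k h0 h1]
    have hstep : ∀ (acc : Int × Int), ∀ x ∈ PySem.List.pyRange 1 10 1,
        (fun (st : Int × Int) i =>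
          if (PySem.Set.ofList orders).contains i && (PySem.Set.ofList orders).contains (i - 1) then
            (max st.1 (st.2 + 1), st.2 + 1)
          else
            (st.1, if (PySem.Set.ofList orders).contains i then 1 else 0)) acc x
        = (fun (st : Int × Int) i =>
          if (canonSpots (fun j => orders.contains ((j : Nat) : Int))).contains i &&
             (canonSpots (fun j => orders.contains ((j : Nat) : Int))).contains (i - 1) then
            (max st.1 (st.2 + 1), st.2 + 1)
          else
            (st.1, if (canonSpots (fun j => orders.contains ((j : Nat) : Int))).contains i then 1 else 0)) acc x := by
      intro acc x hx
      rw [PySem.List.mem_pyRange_one] at hx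
      simp only
      rw [hofl x (by omega) (by omega), hofl (x-1) (by omega) (by omega)]
    rw [PySem.List.foldl_congr_mem _ _ _ _ hstep]
    simp only [hfil, hwalk, hofl 9 (by norm_num) (by norm_num), hofl 1 (by norm_num) (by norm_num)]
    generalize (fun j : Fin 10 => orders.contains ((j : Nat) : Int)) = b
    revert b
    decide

-- ===== VERDICT (by name: the statement is the Claim_ definition above) =====
theorem count_consecutive_spots_spec : Claim_equal_count_consecutive_spots := by
  intro orders _
  unfold Spec_count_consecutive_spots
  exact ports_agree orders
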